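-- pv_equiv track=rewrite | github.com/THU-KEG/OmniEvent | src/OpenEE/benchmark/ace2005-zh.py | correct_offsets
-- ===== SOURCE A (Python) =====
-- def correct_offsets(sents,offsets):
--     new_offsets = []
--     minus = 0
--     for i,offsets_per_sentence in enumerate(offsets):
--         sentence = sents[i]
--         new_offsets_per_sentence = []
--         for j,offset in enumerate(offsets_per_sentence):
--             if sentence[j].startswith('<'):
--                 new_offsets_per_sentence.append((0,0))
--                 minus+=len(sentence[j])
--
--             else:
--                 new_offsets_per_sentence.append((offset[0]-minus,offset[1]-minus))
--         new_offsets.append(new_offsets_per_sentence)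
--     return sents,new_offsets
-- ===== SOURCE B (Python) =====
-- def correct_offsets(sents, offsets):
--     # pass 1: per-token cumulative removed-tag length, carried across sentence boundaries
--     minus_table = []
--     acc = 0
--     for i, row in enumerate(offsets):
--         sentence = sents[i]
--         trow = []
--         for j in range(len(row)):
--             trow.append(acc)
--             if sentence[j].startswith('<'):
--                 acc += len(sentence[j])
--         minus_table.append(trow)
--     # pass 2: rebuild the nested offsets from the table
--     new_offsets = []
--     for i, row in enumerate(offsets):
--         sentence = sents[i]
--         new_offsets.append([
--             (0, 0) if sentence[j].startswith('<') else (off[0] - m, off[1] - m)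
--             for j, (off, m) in enumerate(zip(row, minus_table[i]))
--         ])
--     return sents, new_offsets
-- ===== Notes on version B (the rewrite author's own statement) =====
-- stated objective: alternative
-- what changed: B replaces A's single interleaved pass with an inline running counter by two passes: a first pass precomputes, per token, the cumulative removed-tag length (a prefix table carried across sentence boundaries), and a second pass rebuilds the nested offsets purely by table lookup.
import Mathlib
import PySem

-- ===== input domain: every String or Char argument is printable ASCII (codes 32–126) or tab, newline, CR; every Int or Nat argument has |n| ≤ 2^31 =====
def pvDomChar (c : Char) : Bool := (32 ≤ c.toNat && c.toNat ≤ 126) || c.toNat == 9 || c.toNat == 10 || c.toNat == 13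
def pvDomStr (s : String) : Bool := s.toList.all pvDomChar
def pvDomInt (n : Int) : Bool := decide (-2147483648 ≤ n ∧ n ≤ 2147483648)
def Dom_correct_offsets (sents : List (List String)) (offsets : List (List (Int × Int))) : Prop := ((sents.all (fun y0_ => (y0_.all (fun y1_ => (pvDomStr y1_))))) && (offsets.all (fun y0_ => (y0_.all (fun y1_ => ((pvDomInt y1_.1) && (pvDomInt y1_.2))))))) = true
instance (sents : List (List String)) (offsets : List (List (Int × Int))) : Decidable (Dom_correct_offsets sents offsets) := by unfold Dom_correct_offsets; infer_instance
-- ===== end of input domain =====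

-- B changes the decomposition: a first pass precomputes a per-token cumulative removed-tag
-- length table (carried across sentences), a second pass rebuilds offsets by table lookup.
-- Equivalence of the return values is proved on all inputs where Python A returns (Pre_).

-- ===== PORT A =====
-- inner loop: for j, offset in enumerate(offsets_per_sentence), state = (new row, minus)
def pvA_inner (sentence : List String) (ops : List (Int × Int)) (j : Nat) (minus : Int) :
    List (Int × Int) × Int :=
  match ops with
  | [] => ([], minus)
  | off :: rest =>
    let tok := (PySem.List.pyGet? sentence (Int.ofNat j)).getD ""   -- sentence[j]; in range under Pre_
    if PySem.Str.startswith tok "<" then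
      let r := pvA_inner sentence rest (j+1) (minus + PySem.Str.len tok)
      (((0:Int),(0:Int)) :: r.1, r.2)
    else
      let r := pvA_inner sentence rest (j+1) minus
      ((off.1 - minus, off.2 - minus) :: r.1, r.2)

-- outer loop: for i, offsets_per_sentence in enumerate(offsets), minus carried across sentences
def pvA_outer (sents : List (List String)) (offsets : List (List (Int × Int))) (i : Nat) (minus : Int) :
    List (List (Int × Int)) :=
  match offsets with
  | [] => []
  | ops :: rest =>
    let sentence := (PySem.List.pyGet? sents (Int.ofNat i)).getD []  -- sents[i]; in range under Pre_
    let r := pvA_inner sentence ops 0 minus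
    r.1 :: pvA_outer sents rest (i+1) r.2

def correct_offsets (sents : List (List String)) (offsets : List (List (Int × Int))) : List (List String) × (List (List (Int × Int))) :=
  (sents, pvA_outer sents offsets 0 0)

-- ===== PORT B =====
-- pass 1, inner: table row of cumulative removed lengths, one entry per offset
def pvB_row (sentence : List String) (ops : List (Int × Int)) (j : Nat) (acc : Int) :
    List Int × Int :=
  match ops with
  | [] => ([], acc)
  | _ :: rest =>
    let tok := (PySem.List.pyGet? sentence (Int.ofNat j)).getD ""   -- sentence[j]; in range under Pre_
    let acc' := if PySem.Str.startswith tok "<" then acc + PySem.Str.len tok else acc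
    let r := pvB_row sentence rest (j+1) acc'
    (acc :: r.1, r.2)

-- pass 1, outer: the whole table, accumulator global across sentences
def pvB_table (sents : List (List String)) (offsets : List (List (Int × Int))) (i : Nat) (acc : Int) :
    List (List Int) :=
  match offsets with
  | [] => []
  | ops :: rest =>
    let sentence := (PySem.List.pyGet? sents (Int.ofNat i)).getD []
    let r := pvB_row sentence ops 0 acc
    r.1 :: pvB_table sents rest (i+1) r.2

-- pass 2, inner: zip(row, table row), emit (0,0) for tags else subtract the table entry
def pvB_emitRow (sentence : List String) (ops : List (Int × Int)) (ms : List Int) (j : Nat) :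
    List (Int × Int) :=
  match ops, ms with
  | off :: rest, m :: mrest =>
    let tok := (PySem.List.pyGet? sentence (Int.ofNat j)).getD ""
    (if PySem.Str.startswith tok "<" then ((0:Int),(0:Int)) else (off.1 - m, off.2 - m))
      :: pvB_emitRow sentence rest mrest (j+1)
  | _, _ => []

-- pass 2, outer
def pvB_emit (sents : List (List String)) (offsets : List (List (Int × Int))) (tab : List (List Int)) (i : Nat) :
    List (List (Int × Int)) :=
  match offsets, tab with
  | ops :: rest, ms :: trest =>
    let sentence := (PySem.List.pyGet? sents (Int.ofNat i)).getD []
    pvB_emitRow sentence ops ms 0 :: pvB_emit sents rest trest (i+1)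
  | _, _ => []

def correct_offsets_alt (sents : List (List String)) (offsets : List (List (Int × Int))) : List (List String) × (List (List (Int × Int))) :=
  let tab := pvB_table sents offsets 0 0
  (sents, pvB_emit sents offsets tab 0)

-- ===== PRECONDITION & SPEC =====
-- Pre_ excludes exactly the inputs where Python A raises IndexError: the j-th offsets row needs
-- sents[j] to exist and be at least as long as the row.
def Pre_correct_offsets (sents : List (List String)) (offsets : List (List (Int × Int))) : Prop :=
  offsets.length ≤ sents.length ∧
  ∀ p ∈ offsets.zip sents, p.1.length ≤ p.2.length
instance (sents : List (List String)) (offsets : List (List (Int × Int))) : Decidable (Pre_correct_offsets sents offsets) := by unfold Pre_correct_offsets; infer_instance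

def pvWitness_correct_offsets : List (List String) × (List (List (Int × Int))) :=
  ([["<t>", "ab"], ["c"]], [[(0, 0), (3, 5)], [(6, 7)]])

def Spec_correct_offsets (sents : List (List String)) (offsets : List (List (Int × Int))) (out : List (List String) × (List (List (Int × Int)))) : Prop := out = correct_offsets_alt sents offsets
instance (sents : List (List String)) (offsets : List (List (Int × Int))) (out : List (List String) × (List (List (Int × Int)))) : Decidable (Spec_correct_offsets sents offsets out) := by unfold Spec_correct_offsets; infer_instance

-- ===== CLAIM (what is proved, stated in full; the proofs are below) =====
def Claim_equal_correct_offsets : Prop := ∀ (sents : List (List String)) (offsets : List (List (Int × Int))), Dom_correct_offsets sents offsets → Pre_correct_offsets sents offsets → Spec_correct_offsets sents offsets (correct_offsets sents offsets)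

-- ===== LEMMAS AND PROOFS =====

theorem pvA_inner_eq (sentence : List String) (ops : List (Int × Int)) (j : Nat) (m : Int) :
    pvA_inner sentence ops j m =
      (pvB_emitRow sentence ops (pvB_row sentence ops j m).1 j, (pvB_row sentence ops j m).2) := by
  induction ops generalizing j m with
  | nil => simp [pvA_inner, pvB_row, pvB_emitRow]
  | cons off rest ih =>
    simp only [pvA_inner, pvB_row, pvB_emitRow]
    split_ifs with h <;> simp [ih]

theorem pvA_outer_eq (sents : List (List String)) (offsets : List (List (Int × Int))) (i : Nat) (m : Int) :
    pvA_outer sents offsets i m = pvB_emit sents offsets (pvB_table sents offsets i m) i := by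
  induction offsets generalizing i m with
  | nil => simp [pvA_outer, pvB_emit]
  | cons ops rest ih =>
    simp only [pvA_outer, pvB_table, pvB_emit]
    rw [pvA_inner_eq, ih]

-- ===== VERDICT (by name: the statement is the Claim_ definition above) =====
theorem correct_offsets_spec : Claim_equal_correct_offsets := by
  intro sents offsets _ _
  unfold Spec_correct_offsets correct_offsets correct_offsets_alt
  rw [pvA_outer_eq]
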